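-- pv_equiv track=rewrite | github.com/Shojiyao12/Anaconda_PL-Prototype | evaluator.py | split_math_expr
-- ===== SOURCE A (Python) =====
-- def split_math_expr(mathExpr, operator):
--
--     arr1 = []
--     arr2 = []
--
--     for i, operand in enumerate(mathExpr):
--         if operand == operator:
--             arr1 = mathExpr[:i]
--             arr2 = mathExpr[i+1:]
--
--     return arr1, arr2
-- ===== SOURCE B (Python) =====
-- def split_math_expr(mathExpr, operator):
--     # reverse scan: stop at the first match from the end (the last occurrence)
--     i = len(mathExpr) - 1
--     while i >= 0:
--         if mathExpr[i] == operator: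
--             return mathExpr[:i], mathExpr[i+1:]
--         i -= 1
--     return [], []
-- ===== Notes on version B (the rewrite author's own statement) =====
-- stated objective: alternative
-- what changed: Replaces A's full forward scan that keeps overwriting the two slices at every match with a backward while-loop that returns at the first match from the end (the last occurrence) and slices only once.
import Mathlib
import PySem

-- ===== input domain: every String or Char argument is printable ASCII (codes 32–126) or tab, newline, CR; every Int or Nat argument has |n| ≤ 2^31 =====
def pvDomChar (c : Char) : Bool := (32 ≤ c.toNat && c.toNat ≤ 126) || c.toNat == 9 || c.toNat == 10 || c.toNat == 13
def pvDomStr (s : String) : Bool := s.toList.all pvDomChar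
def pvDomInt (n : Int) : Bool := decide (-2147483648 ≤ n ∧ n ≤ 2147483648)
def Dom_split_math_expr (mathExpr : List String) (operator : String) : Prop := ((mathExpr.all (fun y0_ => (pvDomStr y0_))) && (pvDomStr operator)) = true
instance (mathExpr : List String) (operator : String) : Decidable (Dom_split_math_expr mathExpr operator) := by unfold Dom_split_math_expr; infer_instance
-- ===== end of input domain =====

-- B replaces A's overwrite-at-every-match forward scan with a backward scan that returns at the last occurrence; same return value everywhere.

-- ===== PORT A =====
def split_math_expr (mathExpr : List String) (operator : String) : List String × List String :=
  (PySem.List.enumerate mathExpr 0).foldl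
    (fun (st : List String × List String) p =>
      if p.2 == operator then
        (PySem.List.slice mathExpr none (some p.1),
         PySem.List.slice mathExpr (some (p.1 + 1)) none)
      else st)
    ([], [])

-- ===== PORT B =====
-- while-loop 'i = len-1; while i >= 0: …; i -= 1' ported with counter k = i + 1
def splitAltGo (mathExpr : List String) (operator : String) : Nat → List String × List String
  | 0 => ([], [])
  | k + 1 =>
    if PySem.List.pyGetD mathExpr (k : Int) "" == operator then
      (PySem.List.slice mathExpr none (some (k : Int)),
       PySem.List.slice mathExpr (some ((k : Int) + 1)) none)
    else splitAltGo mathExpr operator k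

def split_math_expr_alt (mathExpr : List String) (operator : String) : List String × List String :=
  splitAltGo mathExpr operator mathExpr.length

-- ===== PRECONDITION & SPEC =====
def Spec_split_math_expr (mathExpr : List String) (operator : String) (out : List String × List String) : Prop := out = split_math_expr_alt mathExpr operator
instance (mathExpr : List String) (operator : String) (out : List String × List String) : Decidable (Spec_split_math_expr mathExpr operator out) := by unfold Spec_split_math_expr; infer_instance

-- ===== CLAIM (what is proved, stated in full; the proofs are below) =====
def Claim_equal_split_math_expr : Prop := ∀ (mathExpr : List String) (operator : String), Dom_split_math_expr mathExpr operator → Spec_split_math_expr mathExpr operator (split_math_expr mathExpr operator)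

-- ===== LEMMAS AND PROOFS =====

-- A's fold over the first k enumerated items equals B's backward scan over the first k indices.
lemma split_prefix_eq (m : List String) (op : String) :
    ∀ k, k ≤ m.length →
      ((PySem.List.enumerate m 0).take k).foldl
        (fun (st : List String × List String) p =>
          if p.2 == op then
            (PySem.List.slice m none (some p.1),
             PySem.List.slice m (some (p.1 + 1)) none)
          else st)
        ([], []) = splitAltGo m op k := by
  intro k hk
  induction k with
  | zero => simp [splitAltGo]
  | succ k ih =>
    have hk' : k < m.length := by omega
    have hlen : k < (PySem.List.enumerate m 0).length := by
      simpa [PySem.List.length_enumerate] using hk'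
    rw [List.take_succ, List.getElem?_eq_getElem hlen]
    simp only [Option.toList_some, List.foldl_append, List.foldl_cons, List.foldl_nil]
    rw [ih (by omega)]
    rw [PySem.List.getElem_enumerate]
    simp only [splitAltGo, PySem.List.pyGetD_natCast, List.getD_eq_getElem?_getD,
      List.getElem?_eq_getElem hk', Option.getD_some, Int.zero_add]

theorem split_math_expr_spec : Claim_equal_split_math_expr := by
  intro m op _
  show split_math_expr m op = split_math_expr_alt m op
  unfold split_math_expr split_math_expr_alt
  have := split_prefix_eq m op m.length (le_refl _)
  rwa [List.take_of_length_le (by simp [PySem.List.length_enumerate])] at this
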